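-- pv_equiv track=rewrite | github.com/iwrache/LoRA_MPO_LLM | MPO_Compression/main_progressive_with_e2e_2.py | compute_mpo_core_shapes
-- ===== SOURCE A (Python) =====
-- def compute_mpo_core_shapes(out_fac, in_fac, bond_dim, num_cores):
--     shapes, prev = [], 1
--     for k in range(num_cores - 1):
--         rows = prev * out_fac[k] * in_fac[k]
--         cols = 1
--         for j in range(k + 1, num_cores): cols *= out_fac[j] * in_fac[j]
--         r = max(1, min(bond_dim, min(rows, cols)))
--         shapes.append((prev, out_fac[k], in_fac[k], r))
--         prev = r
--     shapes.append((prev, out_fac[-1], in_fac[-1], 1))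
--     return shapes
-- ===== SOURCE B (Python) =====
-- def compute_mpo_core_shapes(out_fac, in_fac, bond_dim, num_cores):
--     facs = [out_fac[k] * in_fac[k] for k in range(num_cores)]
--     suffix = [1]
--     for x in reversed(facs):
--         suffix.append(x * suffix[-1])
--     suffix.reverse()  # suffix[j] = product of facs[j:]
--     ranks = []
--     for k in range(num_cores - 1):
--         prev = ranks[-1] if ranks else 1
--         r = min(bond_dim, prev * facs[k], suffix[k + 1])
--         ranks.append(r if r > 0 else 1)
--     prevs = [1] + ranks
--     body = [(prevs[k], out_fac[k], in_fac[k], ranks[k]) for k in range(num_cores - 1)]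
--     return body + [(prevs[-1], out_fac[-1], in_fac[-1], 1)]
-- ===== Notes on version B (the rewrite author's own statement) =====
-- stated objective: faster
-- what changed: Replaces A's single quadratic fold (recomputing the trailing product of out_fac[j]*in_fac[j] inside every iteration) by three linear staged passes: a suffix-product list of the factor products, a ranks list read off it, and a zip-style assembly of the shape rows from the ranks list.
import Mathlib
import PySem

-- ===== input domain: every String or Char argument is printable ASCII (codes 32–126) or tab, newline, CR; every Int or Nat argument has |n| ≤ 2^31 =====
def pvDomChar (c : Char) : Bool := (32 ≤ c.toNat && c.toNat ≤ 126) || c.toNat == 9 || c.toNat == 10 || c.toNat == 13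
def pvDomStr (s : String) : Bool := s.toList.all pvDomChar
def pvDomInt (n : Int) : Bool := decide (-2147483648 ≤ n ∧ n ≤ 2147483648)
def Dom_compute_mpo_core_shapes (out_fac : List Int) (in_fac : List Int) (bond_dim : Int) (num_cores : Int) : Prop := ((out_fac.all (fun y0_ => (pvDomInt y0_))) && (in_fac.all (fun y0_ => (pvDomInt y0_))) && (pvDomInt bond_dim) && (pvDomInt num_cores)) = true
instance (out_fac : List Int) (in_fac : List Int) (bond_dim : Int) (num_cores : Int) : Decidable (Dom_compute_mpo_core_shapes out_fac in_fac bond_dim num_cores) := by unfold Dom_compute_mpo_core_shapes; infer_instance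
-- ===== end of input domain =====

-- ===== PORT A =====
-- B replaces A's quadratic fold (inner trailing-product loop per core) by three linear staged
-- passes: a suffix-product list, a ranks list, and a zip-style assembly (objective: faster).
-- A-side helpers: the inner 'cols' loop and the outer loop body, as named transliterations
def pvColsA (out_fac : List Int) (in_fac : List Int) (num_cores : Int) (k : Int) : Int :=
  (PySem.List.pyRange (k + 1) num_cores 1).foldl
    (fun c j => c * (PySem.List.pyGetD out_fac j 0 * PySem.List.pyGetD in_fac j 0)) 1

def pvStepA (out_fac : List Int) (in_fac : List Int) (bond_dim : Int) (num_cores : Int)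
    (st : List (List Int) × Int) (k : Int) : List (List Int) × Int :=
  let prev := st.2
  let rows := prev * PySem.List.pyGetD out_fac k 0 * PySem.List.pyGetD in_fac k 0
  let cols := pvColsA out_fac in_fac num_cores k
  let r := max 1 (min bond_dim (min rows cols))
  (st.1 ++ [[prev, PySem.List.pyGetD out_fac k 0, PySem.List.pyGetD in_fac k 0, r]], r)

def compute_mpo_core_shapes (out_fac : List Int) (in_fac : List Int) (bond_dim : Int) (num_cores : Int) : List (List Int) :=
  match (PySem.List.pyRange 0 (num_cores - 1) 1).foldl (pvStepA out_fac in_fac bond_dim num_cores) ([], 1) with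
  | (shapes, prev) => shapes ++ [[prev, PySem.List.pyGetD out_fac (-1) 0, PySem.List.pyGetD in_fac (-1) 0, 1]]

-- ===== PORT B =====
-- B-side helpers: staged passes.  suffix products of facs; then the ranks list; then assembly.
def pvSuffixB (facs : List Int) : List Int :=
  (facs.reverse.foldl (fun s x => s ++ [x * PySem.List.pyGetD s (-1) 1]) [1]).reverse

def pvRanksB (facs : List Int) (bond_dim : Int) (num_cores : Int) (suffix : List Int) : List Int :=
  (PySem.List.pyRange 0 (num_cores - 1) 1).foldl
    (fun ranks k =>
      let prev := PySem.List.pyGetD ranks (-1) 1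
      let r := min (min bond_dim (prev * PySem.List.pyGetD facs k 0)) (PySem.List.pyGetD suffix (k + 1) 1)
      ranks ++ [if 0 < r then r else 1]) []

def compute_mpo_core_shapes_alt (out_fac : List Int) (in_fac : List Int) (bond_dim : Int) (num_cores : Int) : List (List Int) :=
  let facs := (PySem.List.pyRange 0 num_cores 1).map
    (fun k => PySem.List.pyGetD out_fac k 0 * PySem.List.pyGetD in_fac k 0)
  let ranks := pvRanksB facs bond_dim num_cores (pvSuffixB facs)
  let prevs := 1 :: ranks
  ((PySem.List.pyRange 0 (num_cores - 1) 1).map (fun k =>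
      [PySem.List.pyGetD prevs k 0, PySem.List.pyGetD out_fac k 0,
       PySem.List.pyGetD in_fac k 0, PySem.List.pyGetD ranks k 0]))
    ++ [[PySem.List.pyGetD prevs (-1) 1, PySem.List.pyGetD out_fac (-1) 0, PySem.List.pyGetD in_fac (-1) 0, 1]]

-- ===== PRECONDITION & SPEC =====
-- Pre_ is exactly where the Python A returns (no IndexError): both lists nonempty (for the [-1]
-- accesses) and, when num_cores >= 2, the loops index both lists up to num_cores - 1.
def Pre_compute_mpo_core_shapes (out_fac : List Int) (in_fac : List Int) (bond_dim : Int) (num_cores : Int) : Prop :=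
  out_fac ≠ [] ∧ in_fac ≠ [] ∧
    (2 ≤ num_cores → num_cores ≤ (out_fac.length : Int) ∧ num_cores ≤ (in_fac.length : Int))
instance (out_fac : List Int) (in_fac : List Int) (bond_dim : Int) (num_cores : Int) : Decidable (Pre_compute_mpo_core_shapes out_fac in_fac bond_dim num_cores) := by unfold Pre_compute_mpo_core_shapes; infer_instance

def pvWitness_compute_mpo_core_shapes : List Int × List Int × Int × Int := ([2, 3, 2], [3, 2, 2], 4, 3)

def Spec_compute_mpo_core_shapes (out_fac : List Int) (in_fac : List Int) (bond_dim : Int) (num_cores : Int) (out : List (List Int)) : Prop := out = compute_mpo_core_shapes_alt out_fac in_fac bond_dim num_cores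
instance (out_fac : List Int) (in_fac : List Int) (bond_dim : Int) (num_cores : Int) (out : List (List Int)) : Decidable (Spec_compute_mpo_core_shapes out_fac in_fac bond_dim num_cores out) := by unfold Spec_compute_mpo_core_shapes; infer_instance

-- ===== CLAIM (what is proved, stated in full; the proofs are below) =====
def Claim_equal_compute_mpo_core_shapes : Prop := ∀ (out_fac : List Int) (in_fac : List Int) (bond_dim : Int) (num_cores : Int), Dom_compute_mpo_core_shapes out_fac in_fac bond_dim num_cores → Pre_compute_mpo_core_shapes out_fac in_fac bond_dim num_cores → Spec_compute_mpo_core_shapes out_fac in_fac bond_dim num_cores (compute_mpo_core_shapes out_fac in_fac bond_dim num_cores)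

-- ===== LEMMAS AND PROOFS =====

-- suffix products, structurally: pvSufl a ys = [prod ys[0:], prod ys[1:], ..., a]
def pvSufl (a : Int) : List Int → List Int
  | [] => [a]
  | y :: t => (y * (pvSufl a t).headI) :: pvSufl a t

theorem pvSufl_ne_nil (a : Int) (ys : List Int) : pvSufl a ys ≠ [] := by
  cases ys <;> simp [pvSufl]

theorem pvSufl_length (a : Int) (ys : List Int) : (pvSufl a ys).length = ys.length + 1 := by
  induction ys with
  | nil => simp [pvSufl]
  | cons y t ih => simp [pvSufl, ih]

theorem pvSufl_getElem (a : Int) (ys : List Int) (t : Nat) (h : t < (pvSufl a ys).length) :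
    (pvSufl a ys)[t] = (ys.drop t).foldr (· * ·) a := by
  induction ys generalizing t with
  | nil =>
    simp [pvSufl] at h
    subst h; simp [pvSufl]
  | cons y ys ih =>
    cases t with
    | zero =>
      have h0 : 0 < (pvSufl a ys).length := by simp [pvSufl_length]
      have hh : (pvSufl a ys).headI = (ys.drop 0).foldr (· * ·) a := by
        have h00 := ih 0 h0
        rcases hys : pvSufl a ys with _ | ⟨b, l⟩
        · exact absurd hys (pvSufl_ne_nil a ys)
        · simp [hys] at h00; simpa [hys] using h00
      simp at hh
      simp [pvSufl, hh]
    | succ t =>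
      have ht : t < (pvSufl a ys).length := by
        simp [pvSufl_length] at h ⊢; omega
      simp [pvSufl, ih t ht]

theorem pvFoldStep_rev (a : Int) (ys : List Int) (s : List Int) :
    (ys.reverse.foldl (fun s x => s ++ [x * PySem.List.pyGetD s (-1) 1]) (s ++ [a]))
      = s ++ (pvSufl a ys).reverse := by
  induction ys generalizing s a with
  | nil => simp [pvSufl]
  | cons y t ih =>
    have hne : (pvSufl a t).reverse ≠ [] := by
      simpa using pvSufl_ne_nil a t
    calc ((y :: t).reverse.foldl (fun s x => s ++ [x * PySem.List.pyGetD s (-1) 1]) (s ++ [a]))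
        = ((t.reverse ++ [y]).foldl (fun s x => s ++ [x * PySem.List.pyGetD s (-1) 1]) (s ++ [a])) := by
          simp
      _ = (fun s x => s ++ [x * PySem.List.pyGetD s (-1) 1]) (s ++ (pvSufl a t).reverse) y := by
          rw [List.foldl_append, ih]
          simp
      _ = s ++ (pvSufl a t).reverse ++ [y * (pvSufl a t).headI] := by
          have : PySem.List.pyGetD (s ++ (pvSufl a t).reverse) (-1) 1 = (pvSufl a t).headI := by
            cases hys : pvSufl a t with
            | nil => exact absurd hys (pvSufl_ne_nil a t)
            | cons b l =>
              have : s ++ (b :: l).reverse = (s ++ l.reverse) ++ [b] := by simp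
              rw [this, PySem.List.pyGetD_neg_one_append_singleton]
              simp
          simp [this]
      _ = s ++ (pvSufl a (y :: t)).reverse := by
          simp [pvSufl]

theorem pvSuffixB_eq (facs : List Int) : pvSuffixB facs = pvSufl 1 facs := by
  unfold pvSuffixB
  have := pvFoldStep_rev 1 facs []
  simp at this
  simp [this]

theorem pvCols_eq_suffix (out_fac in_fac : List Int) (num_cores k : Int)
    (hk0 : 0 ≤ k) (hk : k < num_cores - 1) :
    PySem.List.pyGetD (pvSuffixB ((PySem.List.pyRange 0 num_cores 1).map
        (fun j => PySem.List.pyGetD out_fac j 0 * PySem.List.pyGetD in_fac j 0))) (k + 1) 1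
      = pvColsA out_fac in_fac num_cores k := by
  set f : Int → Int := fun j => PySem.List.pyGetD out_fac j 0 * PySem.List.pyGetD in_fac j 0 with hf
  set facs : List Int := (PySem.List.pyRange 0 num_cores 1).map f with hfacs
  have hsplit : PySem.List.pyRange 0 num_cores 1
      = PySem.List.pyRange 0 (k + 1) 1 ++ PySem.List.pyRange (k + 1) num_cores 1 :=
    PySem.List.pyRange_one_append 0 (k + 1) num_cores (by omega) (by omega)
  have hlen1 : (PySem.List.pyRange 0 (k + 1) 1).length = (k + 1).toNat := by
    simp [PySem.List.length_pyRange_one]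
  have hlenR : facs.length = num_cores.toNat := by
    simp [hfacs, PySem.List.length_pyRange_one]
  have hidx' : (k + 1).toNat < (pvSufl 1 facs).length := by
    rw [pvSufl_length, hlenR]; omega
  have h1 : PySem.List.pyGetD (pvSuffixB facs) (k + 1) 1
      = (pvSuffixB facs)[(k + 1).toNat]'(by rw [pvSuffixB_eq]; exact hidx') := by
    refine PySem.List.pyGetD_eq_getElem _ _ (by omega) ?_
    rw [pvSuffixB_eq, pvSufl_length, hlenR]; omega
  rw [h1]
  have h2 : (pvSuffixB facs)[(k + 1).toNat]'(by rw [pvSuffixB_eq]; exact hidx')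
      = (facs.drop (k + 1).toNat).foldr (· * ·) 1 := by
    calc (pvSuffixB facs)[(k + 1).toNat]'(by rw [pvSuffixB_eq]; exact hidx')
        = (pvSufl 1 facs)[(k + 1).toNat]'hidx' := by
          congr 1
          exact pvSuffixB_eq facs
      _ = (facs.drop (k + 1).toNat).foldr (· * ·) 1 := pvSufl_getElem 1 _ _ hidx'
  rw [h2]
  have h3 : facs.drop (k + 1).toNat = (PySem.List.pyRange (k + 1) num_cores 1).map f := by
    rw [hfacs, hsplit, List.map_append, List.drop_append_of_le_length (by simp [hlen1])]
    simp [hlen1]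
  rw [h3]
  unfold pvColsA
  rw [show (fun (c : Int) (j : Int) => c * (PySem.List.pyGetD out_fac j 0 * PySem.List.pyGetD in_fac j 0)) = fun c j => c * f j from rfl]
  rw [← List.foldl_map (f := f) (g := (· * ·))]
  rw [← List.prod_eq_foldl, List.prod_eq_foldr]

-- the sequence of bond ranks: pvRk … k is 'prev' entering iteration k of A's loop
def pvRk (out_fac in_fac : List Int) (bond_dim : Int) (suffix : List Int) : Nat → Int
  | 0 => 1
  | k + 1 =>
    let r := min (min bond_dim (pvRk out_fac in_fac bond_dim suffix k *
        (PySem.List.pyGetD out_fac (k : Int) 0 * PySem.List.pyGetD in_fac (k : Int) 0)))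
      (PySem.List.pyGetD suffix ((k : Int) + 1) 1)
    if 0 < r then r else 1

theorem pvMax1 (x : Int) : max 1 x = if 0 < x then x else 1 := by
  split_ifs <;> omega

theorem pvLastD_map_range (g : Nat → Int) (m : Nat) (d : Int) :
    PySem.List.pyGetD ((List.range (m + 1)).map g) (-1) d = g m := by
  rw [List.range_succ, List.map_append]
  simp [PySem.List.pyGetD_neg_one_append_singleton]

-- characterisation of B's ranks fold as a map of pvRk over List.range
theorem pvRanksB_char (out_fac in_fac : List Int) (bond_dim num_cores : Int)
    (facs suffix : List Int)
    (hfacs : facs = (PySem.List.pyRange 0 num_cores 1).map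
      (fun j => PySem.List.pyGetD out_fac j 0 * PySem.List.pyGetD in_fac j 0))
    (m : Nat) (hm : (m : Int) ≤ num_cores - 1) :
    (PySem.List.pyRange 0 (m : Int) 1).foldl
      (fun ranks k =>
        let prev := PySem.List.pyGetD ranks (-1) 1
        let r := min (min bond_dim (prev * PySem.List.pyGetD facs k 0)) (PySem.List.pyGetD suffix (k + 1) 1)
        ranks ++ [if 0 < r then r else 1]) []
    = (List.range m).map (fun k => pvRk out_fac in_fac bond_dim suffix (k + 1)) := by
  induction m with
  | zero => simp [PySem.List.pyRange_one_eq_nil]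
  | succ j ih =>
    have hsr : PySem.List.pyRange 0 ((j : Int) + 1) 1
        = PySem.List.pyRange 0 (j : Int) 1 ++ [(j : Int)] :=
      PySem.List.pyRange_one_succ_right (by omega)
    have hj : (j : Int) ≤ num_cores - 1 := by omega
    have hfj : PySem.List.pyGetD facs (j : Int) 0
        = PySem.List.pyGetD out_fac (j : Int) 0 * PySem.List.pyGetD in_fac (j : Int) 0 := by
      rw [hfacs]
      exact PySem.List.pyGetD_map_pyRange_of_nonneg _ _ _ _ (by omega) (by omega)
    have hprev : PySem.List.pyGetD
        ((List.range j).map (fun k => pvRk out_fac in_fac bond_dim suffix (k + 1))) (-1) 1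
        = pvRk out_fac in_fac bond_dim suffix j := by
      cases j with
      | zero => simp [pvRk, PySem.List.pyGetD, PySem.List.pyGet?]
      | succ i => exact pvLastD_map_range (fun k => pvRk out_fac in_fac bond_dim suffix (k + 1)) i 1
    push_cast
    rw [hsr, List.foldl_append, ih hj]
    simp only [List.foldl_cons, List.foldl_nil, hprev, hfj]
    rw [List.range_succ, List.map_append]
    simp [pvRk]

-- characterisation of A's fold: state after m iterations
theorem pvFoldA_char (out_fac in_fac : List Int) (bond_dim num_cores : Int)
    (suffix : List Int)
    (hsuf : suffix = pvSuffixB ((PySem.List.pyRange 0 num_cores 1).map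
      (fun j => PySem.List.pyGetD out_fac j 0 * PySem.List.pyGetD in_fac j 0)))
    (m : Nat) (hm : (m : Int) ≤ num_cores - 1) :
    (PySem.List.pyRange 0 (m : Int) 1).foldl (pvStepA out_fac in_fac bond_dim num_cores) ([], 1)
    = ((List.range m).map (fun k =>
          [pvRk out_fac in_fac bond_dim suffix k, PySem.List.pyGetD out_fac (k : Int) 0,
           PySem.List.pyGetD in_fac (k : Int) 0, pvRk out_fac in_fac bond_dim suffix (k + 1)]),
       pvRk out_fac in_fac bond_dim suffix m) := by
  induction m with
  | zero => simp [PySem.List.pyRange_one_eq_nil, pvRk]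
  | succ j ih =>
    have hsr : PySem.List.pyRange 0 ((j : Int) + 1) 1
        = PySem.List.pyRange 0 (j : Int) 1 ++ [(j : Int)] :=
      PySem.List.pyRange_one_succ_right (by omega)
    have hcols : PySem.List.pyGetD suffix ((j : Int) + 1) 1
        = pvColsA out_fac in_fac num_cores (j : Int) := by
      rw [hsuf]
      exact pvCols_eq_suffix out_fac in_fac num_cores (j : Int) (by omega) (by omega)
    push_cast
    rw [hsr, List.foldl_append, ih (by omega)]
    simp only [List.foldl_cons, List.foldl_nil]
    unfold pvStepA
    rw [List.range_succ, List.map_append]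
    simp only [List.map_cons, List.map_nil]
    rw [Prod.mk.injEq]
    refine ⟨?_, ?_⟩
    · congr 1
      simp [pvRk, hcols, pvMax1, mul_assoc, min_assoc]
    · simp [pvRk, hcols, pvMax1, mul_assoc, min_assoc]

-- ===== VERDICT (by name: the statement is the Claim_ definition above) =====
set_option maxRecDepth 8000 in
theorem compute_mpo_core_shapes_spec : Claim_equal_compute_mpo_core_shapes := by
  intro out_fac in_fac bond_dim num_cores _ _
  unfold Spec_compute_mpo_core_shapes compute_mpo_core_shapes compute_mpo_core_shapes_alt
  dsimp only
  set facs : List Int := (PySem.List.pyRange 0 num_cores 1).map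
    (fun j => PySem.List.pyGetD out_fac j 0 * PySem.List.pyGetD in_fac j 0) with hfacs
  set suffix : List Int := pvSuffixB facs with hsuf
  clear_value facs suffix
  by_cases hn : num_cores - 1 ≤ 0
  · -- degenerate: the loop range is empty on both sides
    rw [PySem.List.pyRange_one_eq_nil hn]
    simp [pvRanksB, PySem.List.pyRange_one_eq_nil hn, PySem.List.pyGetD,
      PySem.List.pyGet?, PySem.List.pyIdx?]
  · have hM : ((num_cores - 1).toNat : Int) = num_cores - 1 := by omega
    set M : Nat := (num_cores - 1).toNat with hMdef
    clear_value M
    have hrange : PySem.List.pyRange 0 (num_cores - 1) 1 = PySem.List.pyRange 0 (M : Int) 1 := by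
      rw [hM]
    have hranks : pvRanksB facs bond_dim num_cores suffix
        = (List.range M).map (fun k => pvRk out_fac in_fac bond_dim suffix (k + 1)) := by
      unfold pvRanksB
      rw [hrange]
      exact pvRanksB_char out_fac in_fac bond_dim num_cores facs suffix hfacs M (by omega)
    have hA := pvFoldA_char out_fac in_fac bond_dim num_cores suffix (by rw [hsuf, hfacs]) M (by omega)
    rw [hrange, hA, hranks]
    -- prevs = 1 :: ranks is pvRk mapped over range (M+1)
    have hprevs : (1 : Int) :: (List.range M).map (fun k => pvRk out_fac in_fac bond_dim suffix (k + 1))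
        = (List.range (M + 1)).map (pvRk out_fac in_fac bond_dim suffix) := by
      rw [List.range_succ_eq_map]
      simp [pvRk, Function.comp]
    rw [hprevs]
    congr 1
    · -- the body lists agree entrywise
      rw [PySem.List.pyRange_zero_nat, List.map_map]
      refine (List.map_congr_left ?_).symm
      intro t ht
      have htM : t < M := List.mem_range.mp ht
      have e1 : PySem.List.pyGetD ((List.range (M + 1)).map (pvRk out_fac in_fac bond_dim suffix)) (t : Int) 0
          = pvRk out_fac in_fac bond_dim suffix t := by
        rw [PySem.List.pyGetD_natCast,
          List.getD_eq_getElem _ _ (by simp only [List.length_map, List.length_range]; omega)]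
        simp only [List.getElem_map, List.getElem_range]
      have e2 : PySem.List.pyGetD ((List.range M).map (fun k => pvRk out_fac in_fac bond_dim suffix (k + 1))) (t : Int) 0
          = pvRk out_fac in_fac bond_dim suffix (t + 1) := by
        rw [PySem.List.pyGetD_natCast,
          List.getD_eq_getElem _ _ (by simp only [List.length_map, List.length_range]; omega)]
        simp only [List.getElem_map, List.getElem_range]
      simp only [Function.comp_apply, e1, e2]
    · -- the final rows agree: last of prevs is pvRk M
      have hlast : PySem.List.pyGetD ((List.range (M + 1)).map (pvRk out_fac in_fac bond_dim suffix)) (-1) 1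
          = pvRk out_fac in_fac bond_dim suffix M := by
        exact pvLastD_map_range (pvRk out_fac in_fac bond_dim suffix) M 1
      rw [hlast]
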